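-- pv_equiv track=rewrite | github.com/karstendick/nsolver | nsolver.py | and_candidates
-- ===== SOURCE A (Python) =====
-- from copy import deepcopy
--
-- BLANK = ' '
--
-- def and_candidates(grid, candidates):
--   ret = deepcopy(grid)
--   for i, cell in enumerate(ret):
--     if cell != BLANK:
--       continue
--     can_set = set([candidate[i] for candidate in candidates])
--     if len(can_set) == 1:
--       answer = can_set.pop()
--       ret[i] = answer
--   return ret
-- ===== SOURCE B (Python) =====
-- from copy import deepcopy
--
-- BLANK = ' '
--
-- def and_candidates(grid, candidates):
--     ret = deepcopy(grid)
--     if not candidates: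
--         return ret
--     seed = candidates[0]
--     ok = [cell == BLANK for cell in ret]
--     for cand in candidates[1:]:
--         ok = [good and cand[i] == seed[i] for i, good in enumerate(ok)]
--     return [seed[i] if good else cell for i, (cell, good) in enumerate(zip(ret, ok))]
-- ===== Notes on version B (the rewrite author's own statement) =====
-- stated objective: alternative
-- what changed: A scans cell-major, building a Python set of all candidate values for each blank cell; B scans candidate-major, seeding with candidates[0] and maintaining per-position boolean agreement flags that later candidates can only clear, then fills still-agreeing blanks with the seed value.
import Mathlib
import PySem

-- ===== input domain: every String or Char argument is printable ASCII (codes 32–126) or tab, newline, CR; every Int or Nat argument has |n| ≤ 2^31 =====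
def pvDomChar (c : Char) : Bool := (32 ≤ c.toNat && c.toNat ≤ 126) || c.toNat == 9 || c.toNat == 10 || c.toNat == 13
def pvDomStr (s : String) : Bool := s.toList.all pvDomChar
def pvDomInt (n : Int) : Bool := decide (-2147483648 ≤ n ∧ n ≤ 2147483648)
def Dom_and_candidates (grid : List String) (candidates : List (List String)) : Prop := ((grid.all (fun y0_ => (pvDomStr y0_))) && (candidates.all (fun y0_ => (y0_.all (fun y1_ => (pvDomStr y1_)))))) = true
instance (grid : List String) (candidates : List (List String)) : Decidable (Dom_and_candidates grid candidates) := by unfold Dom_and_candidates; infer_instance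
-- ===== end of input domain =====

-- B replaces A's per-cell candidate-set construction by a candidate-major sweep that
-- maintains per-position agreement flags against candidates[0] (alternative decomposition, same cost).


-- ===== PORT A =====
-- 'candidate[i]' is ported as pyGetD with default "": Pre_and_candidates excludes exactly the
-- inputs where Python raises IndexError there, so the default is never the value used.
def and_candidates (grid : List String) (candidates : List (List String)) : List String :=
  let ret := grid   -- ret = deepcopy(grid)
  (PySem.List.enumerate ret).foldl (fun ret p =>
    if p.2 ≠ " " then ret
    else
      let canSet : PySem.Set String :=
        PySem.Set.ofList (candidates.map (fun c => PySem.List.pyGetD c p.1 ""))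
      if canSet.length = 1 then ret.set p.1.toNat (canSet.headD "")   -- answer = can_set.pop()
      else ret) ret

-- ===== PORT B =====
def and_candidates_alt (grid : List String) (candidates : List (List String)) : List String :=
  let ret := grid   -- ret = deepcopy(grid)
  match candidates with
  | [] => ret
  | seed :: rest =>
    let ok0 := ret.map (fun cell => cell == " ")
    let ok := rest.foldl (fun ok cand =>
      (PySem.List.enumerate ok).map (fun p =>
        p.2 && (PySem.List.pyGetD cand p.1 "" == PySem.List.pyGetD seed p.1 ""))) ok0
    (PySem.List.enumerate (ret.zip ok)).map (fun p =>
      if p.2.2 then PySem.List.pyGetD seed p.1 "" else p.2.1)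

-- ===== PRECONDITION & SPEC =====
-- Pre_ excludes exactly the inputs where A raises IndexError: a blank cell at index i
-- together with some candidate of length ≤ i.
def Pre_and_candidates (grid : List String) (candidates : List (List String)) : Prop :=
  ∀ (i : Nat) (h : i < grid.length), grid[i] = " " → ∀ c ∈ candidates, i < c.length
instance (grid : List String) (candidates : List (List String)) : Decidable (Pre_and_candidates grid candidates) := by unfold Pre_and_candidates; infer_instance

def pvWitness_and_candidates : List String × List (List String) :=
  ([" ", "ab", " "], [["x", "q", "z"], ["x", "r", "w"]])

def Spec_and_candidates (grid : List String) (candidates : List (List String)) (out : List String) : Prop := out = and_candidates_alt grid candidates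
instance (grid : List String) (candidates : List (List String)) (out : List String) : Decidable (Spec_and_candidates grid candidates out) := by unfold Spec_and_candidates; infer_instance

-- ===== CLAIM (what is proved, stated in full; the proofs are below) =====
def Claim_equal_and_candidates : Prop := ∀ (grid : List String) (candidates : List (List String)), Dom_and_candidates grid candidates → Pre_and_candidates grid candidates → Spec_and_candidates grid candidates (and_candidates grid candidates)

-- ===== LEMMAS AND PROOFS =====

-- setting the element right after a prefix
theorem pv_set_append {α : Type} (pre : List α) (c v : α) (rest : List α) :
    (pre ++ c :: rest).set pre.length v = pre ++ v :: rest := by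
  induction pre with
  | nil => simp
  | cons a t ih => simp [ih]

-- A's loop: a foldl over enumerate that conditionally sets the current index is a mapIdx
theorem pv_loopA (cond : Int → String → Bool) (v : Int → String → String) :
    ∀ (l pre : List String),
      (PySem.List.enumerate l (pre.length : Int)).foldl
        (fun ret p => if cond p.1 p.2 then ret.set p.1.toNat (v p.1 p.2) else ret) (pre ++ l)
      = pre ++ l.mapIdx (fun j cell =>
          if cond ((pre.length + j : Nat) : Int) cell then v ((pre.length + j : Nat) : Int) cell else cell) := by
  intro l
  induction l with
  | nil => intro pre; simp [PySem.List.enumerate_nil]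
  | cons cell rest ih =>
    intro pre
    rw [PySem.List.enumerate_cons, List.foldl_cons]
    have hsetnat : ((pre.length : Int)).toNat = pre.length := by simp
    set x : String := if cond (pre.length : Int) cell then v (pre.length : Int) cell else cell with hx
    have hstep : (if cond ((pre.length : Int)) cell then
        (pre ++ cell :: rest).set ((pre.length : Int)).toNat (v (pre.length : Int) cell)
        else pre ++ cell :: rest) = (pre ++ [x]) ++ rest := by
      rw [hsetnat]
      by_cases h : cond (pre.length : Int) cell = true
      · simp [h, hx, pv_set_append pre cell (v (pre.length : Int) cell) rest]
      · simp [h, hx]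
    rw [hstep]
    have hlen : ((pre ++ [x]).length : Int) = (pre.length : Int) + 1 := by
      simp
    rw [← hlen, ih (pre ++ [x]), List.mapIdx_cons, List.append_assoc, List.singleton_append]
    simp only [hx]
    norm_num
    have h3 : ∀ (j : Nat), (pre.length : Int) + 1 + (j : Int) = (pre.length : Int) + ((j : Int) + 1) := by
      intro j; ring
    simp only [h3]

-- length is preserved by B's flag-update loop
theorem pv_okLen (seed : List String) :
    ∀ (rest : List (List String)) (ok : List Bool),
      (rest.foldl (fun ok cand =>
        (PySem.List.enumerate ok).map (fun p =>
          p.2 && (PySem.List.pyGetD cand p.1 "" == PySem.List.pyGetD seed p.1 ""))) ok).length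
      = ok.length := by
  intro rest
  induction rest with
  | nil => intro ok; rfl
  | cons cand rest ih =>
    intro ok
    rw [List.foldl_cons, ih]
    simp [PySem.List.length_enumerate]

-- value of B's flags after the loop
theorem pv_okGet (seed : List String) :
    ∀ (rest : List (List String)) (ok : List Bool) (j : Nat),
      (rest.foldl (fun ok cand =>
        (PySem.List.enumerate ok).map (fun p =>
          p.2 && (PySem.List.pyGetD cand p.1 "" == PySem.List.pyGetD seed p.1 ""))) ok)[j]?
      = ok[j]?.map (fun b => b && rest.all (fun cand =>
          PySem.List.pyGetD cand (j : Int) "" == PySem.List.pyGetD seed (j : Int) "")) := by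
  intro rest
  induction rest with
  | nil => intro ok j; cases h : ok[j]? <;> simp [h]
  | cons cand rest ih =>
    intro ok j
    rw [List.foldl_cons, ih]
    rw [List.getElem?_map, PySem.List.getElem?_enumerate]
    cases h : ok[j]? with
    | none => simp
    | some b => simp [Bool.and_assoc]

-- a set built from x :: xs is the singleton [x] iff every element of xs equals x
theorem pv_set_singleton_iff (x : String) (xs : List String) :
    (PySem.Set.ofList (x :: xs)).length = 1 ↔ xs.all (fun y => y == x) = true := by
  constructor
  · intro hlen
    have hx : x ∈ PySem.Set.ofList (x :: xs) := by
      rw [PySem.Set.mem_ofList]; exact List.mem_cons_self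
    rw [List.all_eq_true]
    intro y hy
    have hy' : y ∈ PySem.Set.ofList (x :: xs) := by
      rw [PySem.Set.mem_ofList]; exact List.mem_cons_of_mem _ hy
    match hs : PySem.Set.ofList (x :: xs) with
    | [a] =>
      rw [hs] at hx hy'
      simp at hx hy' ⊢
      rw [hy', ← hx]
    | [] => rw [hs] at hlen; simp at hlen
    | a :: b :: t => rw [hs] at hlen; simp at hlen
  · intro hall
    have hmem : ∀ y ∈ PySem.Set.ofList (x :: xs), y = x := by
      intro y hy
      rw [PySem.Set.mem_ofList] at hy
      rcases List.mem_cons.mp hy with h | h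
      · exact h
      · rw [List.all_eq_true] at hall
        simpa using hall y h
    have hnd : (PySem.Set.ofList (x :: xs)).Nodup := PySem.Set.nodup_ofList _
    have hx : x ∈ PySem.Set.ofList (x :: xs) := by
      rw [PySem.Set.mem_ofList]; exact List.mem_cons_self
    match hs : PySem.Set.ofList (x :: xs) with
    | [] => rw [hs] at hx; simp at hx
    | [a] => rfl
    | a :: b :: t =>
      rw [hs] at hmem hnd
      have ha := hmem a List.mem_cons_self
      have hb := hmem b (List.mem_cons_of_mem _ List.mem_cons_self)
      rw [List.nodup_cons] at hnd
      exact absurd (by rw [ha, hb] : a = b) (fun h => hnd.1 (h ▸ List.mem_cons_self))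

theorem pv_set_head (x : String) (xs : List String) :
    (PySem.Set.ofList (x :: xs)).headD "" = x := by
  rw [PySem.Set.ofList_cons]; rfl

-- A as a mapIdx over the grid
theorem pv_A_mapIdx (grid : List String) (candidates : List (List String)) :
    and_candidates grid candidates
    = grid.mapIdx (fun j cell =>
        if (cell == " ") && ((PySem.Set.ofList (candidates.map (fun c => PySem.List.pyGetD c (j : Int) ""))).length == 1)
        then (PySem.Set.ofList (candidates.map (fun c => PySem.List.pyGetD c (j : Int) ""))).headD ""
        else cell) := by
  unfold and_candidates
  have hstep : (fun (ret : List String) (p : Int × String) =>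
      if p.2 ≠ " " then ret
      else
        let canSet : PySem.Set String := PySem.Set.ofList (candidates.map (fun c => PySem.List.pyGetD c p.1 ""))
        if canSet.length = 1 then ret.set p.1.toNat (canSet.headD "") else ret)
      = (fun (ret : List String) (p : Int × String) =>
        if (p.2 == " ") && ((PySem.Set.ofList (candidates.map (fun c => PySem.List.pyGetD c p.1 ""))).length == 1)
        then ret.set p.1.toNat ((PySem.Set.ofList (candidates.map (fun c => PySem.List.pyGetD c p.1 ""))).headD "")
        else ret) := by
    funext ret p
    by_cases h1 : p.2 = " " <;>
      by_cases h2 : (PySem.Set.ofList (candidates.map (fun c => PySem.List.pyGetD c p.1 ""))).length = 1 <;>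
        simp [h1, h2]
  show (PySem.List.enumerate grid 0).foldl _ grid = _
  rw [hstep]
  have h0 := pv_loopA
      (fun i cell => (cell == " ") && ((PySem.Set.ofList (candidates.map (fun c => PySem.List.pyGetD c i ""))).length == 1))
      (fun i cell => (PySem.Set.ofList (candidates.map (fun c => PySem.List.pyGetD c i ""))).headD "")
      grid []
  simpa using h0

-- B (for nonempty candidates) as a mapIdx over the grid
theorem pv_alt_eq (grid : List String) (seed : List String) (rest : List (List String)) :
    and_candidates_alt grid (seed :: rest)
    = grid.mapIdx (fun j cell =>
        if (cell == " ") && rest.all (fun cand =>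
            PySem.List.pyGetD cand (j : Int) "" == PySem.List.pyGetD seed (j : Int) "")
        then PySem.List.pyGetD seed (j : Int) "" else cell) := by
  unfold and_candidates_alt
  have hoklen : (rest.foldl (fun ok cand =>
      (PySem.List.enumerate ok).map (fun p =>
        p.2 && (PySem.List.pyGetD cand p.1 "" == PySem.List.pyGetD seed p.1 "")))
      (grid.map (fun cell => cell == " "))).length = grid.length := by
    rw [pv_okLen]; simp
  apply List.ext_getElem
  · simp [PySem.List.length_enumerate, hoklen]
  · intro j hj1 hj2
    have hjg : j < grid.length := by
      simpa [PySem.List.length_enumerate, hoklen] using hj1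
    have hok : (rest.foldl (fun ok cand =>
        (PySem.List.enumerate ok).map (fun p =>
          p.2 && (PySem.List.pyGetD cand p.1 "" == PySem.List.pyGetD seed p.1 "")))
        (grid.map (fun cell => cell == " ")))[j]?
        = some ((grid[j]'hjg == " ") && rest.all (fun cand =>
            PySem.List.pyGetD cand (j : Int) "" == PySem.List.pyGetD seed (j : Int) "")) := by
      rw [pv_okGet]
      rw [List.getElem?_map, List.getElem?_eq_getElem hjg]
      rfl
    have hokj : (rest.foldl (fun ok cand =>
        (PySem.List.enumerate ok).map (fun p =>
          p.2 && (PySem.List.pyGetD cand p.1 "" == PySem.List.pyGetD seed p.1 "")))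
        (grid.map (fun cell => cell == " ")))[j]'(by rw [hoklen]; exact hjg)
        = ((grid[j]'hjg == " ") && rest.all (fun cand =>
            PySem.List.pyGetD cand (j : Int) "" == PySem.List.pyGetD seed (j : Int) "")) := by
      have h2 := hok
      rw [List.getElem?_eq_getElem (by rw [hoklen]; exact hjg)] at h2
      exact Option.some.inj h2
    simp only [List.getElem_map, PySem.List.getElem_enumerate, List.getElem_zip,
      List.getElem_mapIdx, hokj]
    simp

-- pointwise agreement of the two mapIdx bodies (nonempty candidates)
theorem pv_point (seed : List String) (rest : List (List String)) (j : Nat) (cell : String) :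
    (if (cell == " ") && ((PySem.Set.ofList ((seed :: rest).map (fun c => PySem.List.pyGetD c (j : Int) ""))).length == 1)
     then (PySem.Set.ofList ((seed :: rest).map (fun c => PySem.List.pyGetD c (j : Int) ""))).headD "" else cell)
    = (if (cell == " ") && rest.all (fun cand =>
          PySem.List.pyGetD cand (j : Int) "" == PySem.List.pyGetD seed (j : Int) "")
       then PySem.List.pyGetD seed (j : Int) "" else cell) := by
  rw [List.map_cons]
  by_cases hb : cell = " "
  · by_cases hall : rest.all (fun cand =>
        PySem.List.pyGetD cand (j : Int) "" == PySem.List.pyGetD seed (j : Int) "") = true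
    · have h1 : ((rest.map (fun c => PySem.List.pyGetD c (j : Int) "")).all
          (fun y => y == PySem.List.pyGetD seed (j : Int) "")) = true := by
        rw [List.all_map]; simpa using hall
      have hlen := (pv_set_singleton_iff _ _).mpr h1
      rw [hb]
      rw [pv_set_head]
      simp only [beq_self_eq_true, Bool.true_and, hall, hlen]
    · have hlen : ¬ ((PySem.Set.ofList (PySem.List.pyGetD seed (j : Int) "" ::
          rest.map (fun c => PySem.List.pyGetD c (j : Int) ""))).length = 1) := by
        intro h
        have h2 := (pv_set_singleton_iff _ _).mp h
        rw [List.all_map] at h2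
        exact hall (by simpa using h2)
      rw [hb]
      rw [Bool.not_eq_true] at hall
      have hlen2 : ((PySem.Set.ofList (PySem.List.pyGetD seed (j : Int) "" ::
          rest.map (fun c => PySem.List.pyGetD c (j : Int) ""))).length == 1) = false := by
        rw [beq_eq_false_iff_ne]; exact hlen
      simp only [beq_self_eq_true, Bool.true_and, hall, hlen2]
      simp
  · simp [hb]

-- ===== VERDICT (by name: the statement is the Claim_ definition above) =====
theorem and_candidates_spec : Claim_equal_and_candidates := by
  intro grid candidates _ _
  unfold Spec_and_candidates
  rw [pv_A_mapIdx]
  cases candidates with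
  | nil =>
    rw [show and_candidates_alt grid [] = grid from rfl]
    simp only [List.map_nil]
    apply List.ext_getElem
    · simp
    · intro j h1 h2
      simp [List.getElem_mapIdx, PySem.Set.ofList]
  | cons seed rest =>
    rw [pv_alt_eq]
    congr 1
    funext j cell
    exact pv_point seed rest j cell
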